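-- pv_equiv track=rewrite | github.com/Miguel-Lopez-06/Sorting-Algorithm-Project | app.py | merge_sort_history
-- ===== SOURCE A (Python) =====
-- def merge_sort_history(arr, order):
--     history = []
--     def _merge_sort(a, l, r):
--         if l < r:
--             m = (l + r) // 2
--             _merge_sort(a, l, m)
--             _merge_sort(a, m + 1, r)
--             merge(a, l, m, r)
--     def merge(a, l, m, r):
--         left = a[l:m+1]
--         right = a[m+1:r+1]
--         i = j = 0
--         for k in range(l, r + 1):
--             if i < len(left) and (j == len(right) or
--                ((order == 'ASC' and left[i] <= right[j]) or (order == 'DESC' and left[i] >= right[j]))):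
--                 a[k] = left[i]
--                 i += 1
--             else:
--                 a[k] = right[j]
--                 j += 1
--             history.append(a[:])
--     a = arr[:]
--     history.append(a[:])
--     _merge_sort(a, 0, len(a) - 1)
--     return history
-- ===== SOURCE B (Python) =====
-- def merge_sort_history(arr, order):
--     history = []
--     def merge(a, l, m, r):
--         left = a[l:m+1]
--         right = a[m+1:r+1]
--         i = j = 0
--         for k in range(l, r + 1):
--             if i < len(left) and (j == len(right) or
--                ((order == 'ASC' and left[i] <= right[j]) or (order == 'DESC' and left[i] >= right[j]))):
--                 a[k] = left[i]
--                 i += 1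
--             else:
--                 a[k] = right[j]
--                 j += 1
--             history.append(a[:])
--     a = arr[:]
--     history.append(a[:])
--     # iterative depth-first driver: a work stack replaces the recursion
--     stack = [('sort', 0, len(a) - 1, None)]
--     while stack:
--         kind, l, r, m = stack.pop()
--         if kind == 'sort':
--             if l < r:
--                 m = (l + r) // 2
--                 stack.append(('merge', l, r, m))
--                 stack.append(('sort', m + 1, r, None))
--                 stack.append(('sort', l, m, None))
--         else:
--             merge(a, l, m, r)
--     return history
-- ===== Notes on version B (the rewrite author's own statement) =====
-- stated objective: alternative
-- what changed: The recursive _merge_sort driver is replaced by an explicit work-item stack (('sort',l,r) / ('merge',l,r,m) entries) that performs the same depth-first post-order merge schedule iteratively; the merge routine and its per-write snapshots are unchanged.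
import Mathlib
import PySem

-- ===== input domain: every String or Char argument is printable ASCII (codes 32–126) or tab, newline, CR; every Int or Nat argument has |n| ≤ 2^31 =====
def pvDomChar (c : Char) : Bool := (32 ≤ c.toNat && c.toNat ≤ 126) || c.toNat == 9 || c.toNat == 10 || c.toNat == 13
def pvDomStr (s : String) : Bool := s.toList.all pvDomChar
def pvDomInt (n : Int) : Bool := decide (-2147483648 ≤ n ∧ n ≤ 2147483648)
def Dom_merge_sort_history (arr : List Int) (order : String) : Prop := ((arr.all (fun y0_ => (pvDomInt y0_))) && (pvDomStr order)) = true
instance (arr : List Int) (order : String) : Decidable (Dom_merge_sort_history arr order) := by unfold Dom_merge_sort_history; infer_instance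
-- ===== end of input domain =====

-- B replaces A's recursive _merge_sort with an explicit work-item stack performing the same
-- depth-first post-order merge schedule (same merge routine, same snapshots); objective: alternative.


-- ===== PORT A =====
-- shared helper: the inner 'merge' function, textually identical in Source A and Source B.
-- a[k] = x is ported as List.set k.toNat (exact: every write index k satisfies 0 ≤ k < len(a)
-- on reachable calls), left[i]/right[j] as getD 0 (exact: guards keep i, j in range in Python).
def pvMerge (ord : String) (a0 : List Int) (l m r : Int) (hist : List (List Int)) :
    List Int × List (List Int) :=
  let left := PySem.List.slice a0 (some l) (some (m + 1))
  let right := PySem.List.slice a0 (some (m + 1)) (some (r + 1))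
  let st := (PySem.List.pyRange l (r + 1) 1).foldl
    (fun (st : List Int × Nat × Nat × List (List Int)) (k : Int) =>
      let (a, i, j, h) := st
      if i < left.length ∧ (j = right.length ∨
          ((ord = "ASC" ∧ left.getD i 0 ≤ right.getD j 0) ∨
           (ord = "DESC" ∧ right.getD j 0 ≤ left.getD i 0)))
      then
        let a' := a.set k.toNat (left.getD i 0)
        (a', i + 1, j, h ++ [a'])
      else
        let a' := a.set k.toNat (right.getD j 0)
        (a', i, j + 1, h ++ [a']))
    (a0, 0, 0, hist)
  (st.1, st.2.2.2)

-- A's recursive _merge_sort, threading the mutated array and the history accumulator.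
-- fuel is a totality guard only: it strictly exceeds the recursion depth at every call
-- (each recursive call strictly shrinks the interval), so the 0 case is never reached.
def pvMsA (ord : String) (fuel : Nat) (a : List Int) (l r : Int) (hist : List (List Int)) :
    List Int × List (List Int) :=
  match fuel with
  | 0 => (a, hist)
  | fuel + 1 =>
    if l < r then
      let m := PySem.Int.floordiv (l + r) 2
      let p1 := pvMsA ord fuel a l m hist
      let p2 := pvMsA ord fuel p1.1 (m + 1) r p1.2
      pvMerge ord p2.1 l m r p2.2
    else (a, hist)

def merge_sort_history (arr : List Int) (order : String) : List (List Int) :=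
  (pvMsA order (arr.length + 1) arr 0 ((arr.length : Int) - 1) [arr]).2

-- ===== PORT B =====
-- work items of Source B's explicit stack: ('sort', l, r, None) and ('merge', l, r, m)
inductive PvTask
  | sort : Int → Int → PvTask
  | mrg : Int → Int → Int → PvTask

-- Source B's while-stack loop. fuel is a totality guard only: it strictly exceeds the number of
-- loop iterations (proved below: the top-level call supplies 2 * 3 ^ len fuel, an upper bound
-- on the step count of processing the initial work item), so the 0 case is never reached.
def pvRun (ord : String) (a : List Int) (hist : List (List Int)) (fuel : Nat)
    (stack : List PvTask) : List (List Int) :=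
  match fuel, stack with
  | 0, _ => hist
  | _ + 1, [] => hist
  | fuel + 1, .sort l r :: rest =>
    if l < r then
      let m := PySem.Int.floordiv (l + r) 2
      pvRun ord a hist fuel (.sort l m :: .sort (m + 1) r :: .mrg l m r :: rest)
    else pvRun ord a hist fuel rest
  | fuel + 1, .mrg l m r :: rest =>
    let p := pvMerge ord a l m r hist
    pvRun ord p.1 p.2 fuel rest

def merge_sort_history_alt (arr : List Int) (order : String) : List (List Int) :=
  pvRun order arr [arr] (2 * 3 ^ arr.length) [.sort 0 ((arr.length : Int) - 1)]

-- ===== PRECONDITION & SPEC =====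
def Spec_merge_sort_history (arr : List Int) (order : String) (out : List (List Int)) : Prop := out = merge_sort_history_alt arr order
instance (arr : List Int) (order : String) (out : List (List Int)) : Decidable (Spec_merge_sort_history arr order out) := by unfold Spec_merge_sort_history; infer_instance

-- ===== CLAIM (what is proved, stated in full; the proofs are below) =====
def Claim_equal_merge_sort_history : Prop := ∀ (arr : List Int) (order : String), Dom_merge_sort_history arr order → Spec_merge_sort_history arr order (merge_sort_history arr order)

-- ===== LEMMAS AND PROOFS =====

-- proof-side step count of processing one ('sort', l, r) work item of B's stack machine
def pvSteps (l r : Int) : Nat :=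
  if h : l < r then
    pvSteps l (PySem.Int.floordiv (l + r) 2) + pvSteps (PySem.Int.floordiv (l + r) 2 + 1) r + 2
  else 1
termination_by (r - l).toNat
decreasing_by
  · have h2 : PySem.Int.floordiv (l + r) 2 < r :=
      (PySem.Int.floordiv_lt_iff_lt_mul (by norm_num)).mpr (by omega)
    omega
  · have h1 := (PySem.Int.floordiv_two_mid_bounds (le_of_lt h)).1
    omega

lemma pvSteps_le : ∀ (n : Nat) (l r : Int), (r - l).toNat ≤ n →
    pvSteps l r ≤ 2 * 3 ^ (r + 1 - l).toNat := by
  intro n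
  induction n with
  | zero =>
    intro l r hle
    rw [pvSteps]
    have hnl : ¬ l < r := by omega
    simp only [hnl, dif_neg, not_false_iff]
    have := Nat.one_le_pow (r + 1 - l).toNat 3 (by norm_num)
    omega
  | succ n ih =>
    intro l r hle
    rw [pvSteps]
    by_cases h : l < r
    · simp only [h, dif_pos]
      have h1 := (PySem.Int.floordiv_two_mid_bounds (le_of_lt h)).1
      have h2 : PySem.Int.floordiv (l + r) 2 < r :=
        (PySem.Int.floordiv_lt_iff_lt_mul (by norm_num)).mpr (by omega)
      set m := PySem.Int.floordiv (l + r) 2 with hm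
      have b1 := ih l m (by omega)
      have b2 := ih (m + 1) r (by omega)
      have e1 : (3:Nat) ^ (m + 1 - l).toNat ≤ 3 ^ ((r + 1 - l).toNat - 1) :=
        Nat.pow_le_pow_right (by norm_num) (by omega)
      have e2 : (3:Nat) ^ (r + 1 - (m + 1)).toNat ≤ 3 ^ ((r + 1 - l).toNat - 1) :=
        Nat.pow_le_pow_right (by norm_num) (by omega)
      have e3 : (3:Nat) ^ (r + 1 - l).toNat = 3 * 3 ^ ((r + 1 - l).toNat - 1) := by
        rw [← pow_succ']
        congr 1
        omega
      have e4 : 1 ≤ (3:Nat) ^ ((r + 1 - l).toNat - 1) := Nat.one_le_pow _ _ (by norm_num)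
      omega
    · simp only [h, dif_neg, not_false_iff]
      have := Nat.one_le_pow (r + 1 - l).toNat 3 (by norm_num)
      omega

lemma pvRun_nil (ord : String) (a : List Int) (hist : List (List Int)) (f : Nat) :
    pvRun ord a hist f [] = hist := by
  cases f <;> rfl

-- B's stack machine on ('sort', l, r) :: rest runs A's recursive sorter, then continues with rest
lemma pvRun_sort (ord : String) : ∀ (n : Nat) (l r : Int), (r - l).toNat ≤ n →
    ∀ (fd f : Nat), (r - l).toNat < fd → pvSteps l r ≤ f →
    ∀ (a : List Int) (hist : List (List Int)) (rest : List PvTask),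
    pvRun ord a hist f (PvTask.sort l r :: rest) =
      pvRun ord (pvMsA ord fd a l r hist).1 (pvMsA ord fd a l r hist).2 (f - pvSteps l r) rest := by
  intro n
  induction n with
  | zero =>
    intro l r hle fd f hfd hf a hist rest
    have hnl : ¬ l < r := by omega
    have hst : pvSteps l r = 1 := by rw [pvSteps]; simp [hnl]
    obtain ⟨fd', rfl⟩ : ∃ fd', fd = fd' + 1 := ⟨fd - 1, by omega⟩
    obtain ⟨f', rfl⟩ : ∃ f', f = f' + 1 := ⟨f - 1, by omega⟩
    rw [pvRun, pvMsA]
    simp [hnl, hst]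
  | succ n ih =>
    intro l r hle fd f hfd hf a hist rest
    obtain ⟨fd', rfl⟩ : ∃ fd', fd = fd' + 1 := ⟨fd - 1, by omega⟩
    by_cases h : l < r
    · have h1 := (PySem.Int.floordiv_two_mid_bounds (le_of_lt h)).1
      have h2 : PySem.Int.floordiv (l + r) 2 < r :=
        (PySem.Int.floordiv_lt_iff_lt_mul (by norm_num)).mpr (by omega)
      set m := PySem.Int.floordiv (l + r) 2 with hm
      have hst : pvSteps l r = pvSteps l m + pvSteps (m + 1) r + 2 := by
        rw [pvSteps]; simp [h, hm]
      obtain ⟨f', rfl⟩ : ∃ f', f = f' + 1 := ⟨f - 1, by omega⟩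
      rw [pvRun]
      simp only [h, if_pos, ← hm]
      rw [ih l m (by omega) fd' f' (by omega) (by omega)]
      rw [ih (m + 1) r (by omega) fd' (f' - pvSteps l m) (by omega) (by omega)]
      obtain ⟨g, hg⟩ : ∃ g, f' - pvSteps l m - pvSteps (m + 1) r = g + 1 :=
        ⟨f' - pvSteps l m - pvSteps (m + 1) r - 1, by omega⟩
      rw [hg, pvRun]
      have hgf : g = f' + 1 - pvSteps l r := by omega
      rw [hgf]
      conv_rhs => rw [pvMsA]
      simp only [h, if_pos, ← hm]
    · have hst : pvSteps l r = 1 := by rw [pvSteps]; simp [h]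
      obtain ⟨f', rfl⟩ : ∃ f', f = f' + 1 := ⟨f - 1, by omega⟩
      rw [pvRun, pvMsA]
      simp [h, hst]

-- ===== VERDICT (by name: the statement is the Claim_ definition above) =====
theorem merge_sort_history_spec : Claim_equal_merge_sort_history := by
  intro arr order _
  unfold Spec_merge_sort_history merge_sort_history merge_sort_history_alt
  have hb := pvSteps_le ((((arr.length : Int) - 1) - 0).toNat) 0 ((arr.length : Int) - 1) le_rfl
  have he : (((arr.length : Int) - 1) + 1 - 0).toNat = arr.length := by omega
  rw [he] at hb
  rw [pvRun_sort order ((((arr.length : Int) - 1) - 0).toNat) 0 ((arr.length : Int) - 1) le_rfl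
      (arr.length + 1) (2 * 3 ^ arr.length) (by omega) hb, pvRun_nil]
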